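-- pv_equiv track=rewrite | github.com/markwatson/ProjectL289Mobile | docs/analyze_captures.py | compute_crc8
-- ===== SOURCE A (Python) =====
-- def compute_crc8(bits: list[int]) -> int:
--     """Compute CRC-8 over a bit array using polynomial 0x07."""
--     crc = 0
--     for bit in bits:
--         crc ^= (bit << 7)
--         if crc & 0x80:
--             crc = ((crc << 1) ^ 0x07) & 0xFF
--         else:
--             crc = (crc << 1) & 0xFF
--     return crc
-- ===== SOURCE B (Python) =====
-- _CRC8_TABLE = []
-- for _b in range(256):
--     _c = _b
--     for _ in range(8):
--         if _c & 0x80: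
--             _c = ((_c << 1) ^ 0x07) & 0xFF
--         else:
--             _c = (_c << 1) & 0xFF
--     _CRC8_TABLE.append(_c)
--
--
-- def compute_crc8(bits: list[int]) -> int:
--     """Compute CRC-8 over a bit array using polynomial 0x07 (table-driven)."""
--     crc = 0
--     n = len(bits)
--     i = 0
--     while i + 8 <= n:
--         byte = 0
--         for b in bits[i:i + 8]:
--             byte = (byte << 1) | (b & 1)
--         crc = _CRC8_TABLE[crc ^ byte]
--         i += 8
--     for b in bits[i:]:
--         crc ^= (b & 1) << 7
--         if crc & 0x80:
--             crc = ((crc << 1) ^ 0x07) & 0xFF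
--         else:
--             crc = (crc << 1) & 0xFF
--     return crc
-- ===== Notes on version B (the rewrite author's own statement) =====
-- stated objective: faster
-- what changed: Replaces A's per-bit CRC update loop with a precomputed 256-entry CRC-8 table consumed one packed byte (8 bits, MSB-first) at a time, with A-style per-bit handling only for the trailing <8 bits.
import Mathlib
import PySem

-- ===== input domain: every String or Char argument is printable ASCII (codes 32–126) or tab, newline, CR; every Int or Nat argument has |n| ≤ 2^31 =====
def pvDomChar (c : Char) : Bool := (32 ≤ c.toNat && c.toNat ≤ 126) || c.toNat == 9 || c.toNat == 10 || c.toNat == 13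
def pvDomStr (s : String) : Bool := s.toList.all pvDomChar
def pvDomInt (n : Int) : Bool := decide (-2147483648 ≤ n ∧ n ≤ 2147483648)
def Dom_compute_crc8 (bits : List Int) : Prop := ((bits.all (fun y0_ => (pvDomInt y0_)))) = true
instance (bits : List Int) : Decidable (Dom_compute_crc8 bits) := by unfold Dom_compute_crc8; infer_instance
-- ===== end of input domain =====

-- B replaces A's per-bit CRC loop by a precomputed 256-entry table consumed a byte
-- (8 packed bits) at a time, with a per-bit tail for the last < 8 bits; measurably
-- faster by a constant factor (fewer branch/update iterations per input bit).

-- ===== PORT A =====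
-- one iteration of A's loop body
def pvStepA (crc bit : Int) : Int :=
  let c := PySem.Int.bxor crc (bit <<< (7 : Nat))
  if PySem.Int.band c 128 ≠ 0 then
    PySem.Int.band (PySem.Int.bxor (c <<< (1 : Nat)) 7) 255
  else
    PySem.Int.band (c <<< (1 : Nat)) 255

def compute_crc8 (bits : List Int) : Int := bits.foldl pvStepA 0

-- ===== PORT B =====
-- the bit-serial update on the crc byte alone (Source B's inner 8-step loop body)
def pvStep0 (c : Int) : Int :=
  if PySem.Int.band c 128 ≠ 0 then
    PySem.Int.band (PySem.Int.bxor (c <<< (1 : Nat)) 7) 255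
  else
    PySem.Int.band (c <<< (1 : Nat)) 255

-- Source B's table entry: 8 bit-serial steps starting from the byte value
def pvTableEntry (b : Int) : Int := (List.range 8).foldl (fun c _ => pvStep0 c) b

-- _CRC8_TABLE
def pvTable : List Int := (List.range 256).map (fun b => pvTableEntry (Int.ofNat b))

-- byte = (byte << 1) | (b & 1) over a chunk, MSB first
def pvPack (chunk : List Int) : Int :=
  chunk.foldl (fun a b => PySem.Int.bor (a <<< (1 : Nat)) (PySem.Int.band b 1)) 0

-- Source B's tail per-bit step: crc ^= (b & 1) << 7; then the bit-serial update
def pvTailStep (crc b : Int) : Int :=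
  pvStep0 (PySem.Int.bxor crc ((PySem.Int.band b 1) <<< (7 : Nat)))

-- the while-loop: full 8-bit chunks through the table, then the per-bit tail
def pvAltLoop : Int → List Int → Int
  | crc, b0 :: b1 :: b2 :: b3 :: b4 :: b5 :: b6 :: b7 :: rest =>
      pvAltLoop
        (pvTable.getD (PySem.Int.bxor crc (pvPack [b0, b1, b2, b3, b4, b5, b6, b7])).toNat 0)
        rest
  | crc, rest => rest.foldl pvTailStep crc

def compute_crc8_alt (bits : List Int) : Int := pvAltLoop 0 bits

-- ===== PRECONDITION & SPEC =====
def Spec_compute_crc8 (bits : List Int) (out : Int) : Prop := out = compute_crc8_alt bits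
instance (bits : List Int) (out : Int) : Decidable (Spec_compute_crc8 bits out) := by unfold Spec_compute_crc8; infer_instance

-- ===== CLAIM (what is proved, stated in full; the proofs are below) =====
def Claim_equal_compute_crc8 : Prop := ∀ (bits : List Int), Dom_compute_crc8 bits → Spec_compute_crc8 bits (compute_crc8 bits)

-- ===== LEMMAS AND PROOFS =====

-- Nat facts
lemma pvNatXorMod (a b : Nat) : (a ^^^ b) % 256 = (a % 256) ^^^ (b % 256) := by
  have h : (a ^^^ b) % 2 ^ 8 = (a % 2 ^ 8) ^^^ (b % 2 ^ 8) := by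
    apply Nat.eq_of_testBit_eq; intro i
    simp only [Nat.testBit_mod_two_pow, Nat.testBit_xor]
    by_cases h : i < 8 <;> simp [h]
  simpa using h

lemma pvNatMask (a : Nat) : a &&& 255 = a % 256 := by
  have := Nat.and_two_pow_sub_one_eq_mod a 8
  simpa using this

lemma pvNatAnd128 (p : Nat) : p &&& 128 = p % 256 &&& 128 := by
  apply Nat.eq_of_testBit_eq; intro i
  by_cases h : i < 8
  · have e : (256 : Nat) = 2 ^ 8 := by norm_num
    rw [e]
    simp only [Nat.testBit_and, Nat.testBit_mod_two_pow, h]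
    simp
  · have h128 : Nat.testBit 128 i = false := by
      apply Nat.testBit_eq_false_of_lt
      calc (128 : Nat) < 2 ^ 8 := by norm_num
        _ ≤ 2 ^ i := Nat.pow_le_pow_right (by norm_num) (by omega)
    simp [Nat.testBit_and, h128]

set_option maxRecDepth 4096 in
lemma pvNatSub255 (x : Nat) (h : x < 256) : 255 - x = 255 ^^^ x := by
  revert h; revert x; decide

lemma pvXorLt (p m : Nat) (hp : p < 256) (hm : m < 256) : p ^^^ m < 256 := by
  have := Nat.xor_lt_two_pow (n := 8) (x := p) (y := m)
  simp only [show (2:Nat)^8 = 256 by norm_num] at this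
  exact this hp hm

lemma pvFlip (p m : Nat) (hp : p < 256) (hm : m < 256) :
    255 - (p ^^^ m) = p ^^^ (255 - m) := by
  rw [pvNatSub255 _ (pvXorLt p m hp hm), pvNatSub255 m hm]
  apply Nat.eq_of_testBit_eq; intro i
  simp [Nat.testBit_xor, Bool.xor_assoc, Bool.xor_left_comm, Bool.xor_comm]

lemma pvFlip2 (p m : Nat) (hp : p < 256) (hm : m < 256) :
    (255 - p) ^^^ (255 - m) = p ^^^ m := by
  rw [pvNatSub255 p hp, pvNatSub255 m hm]
  apply Nat.eq_of_testBit_eq; intro i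
  simp [Nat.testBit_xor, Bool.xor_assoc, Bool.xor_left_comm, Bool.xor_comm]

-- xor modulo 256, over Python ints of any sign
lemma pvXorMod (a b : Int) :
    (PySem.Int.bxor a b) % 256 = (((a % 256).toNat ^^^ (b % 256).toNat : Nat) : Int) := by
  unfold PySem.Int.bxor
  split_ifs with ha hb hb
  · calc ((a.toNat ^^^ b.toNat : Nat) : Int) % 256
        = (((a.toNat ^^^ b.toNat) % 256 : Nat) : Int) := by omega
      _ = (((a.toNat % 256) ^^^ (b.toNat % 256) : Nat) : Int) := by rw [pvNatXorMod]
      _ = (((a % 256).toNat ^^^ (b % 256).toNat : Nat) : Int) := by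
          rw [show (a % 256).toNat = a.toNat % 256 by omega,
              show (b % 256).toNat = b.toNat % 256 by omega]
  · set m := (-b - 1).toNat with hm
    set p := a.toNat with hp
    have h1 : (-((p ^^^ m : Nat) : Int) - 1) % 256 = ((255 - (p ^^^ m) % 256 : Nat) : Int) := by
      omega
    rw [h1, pvNatXorMod]
    rw [show (a % 256).toNat = p % 256 by omega,
        show (b % 256).toNat = 255 - m % 256 by omega]
    rw [pvFlip (p % 256) (m % 256) (by omega) (by omega)]
  · set m := (-a - 1).toNat with hm
    set p := b.toNat with hp
    have h1 : (-((m ^^^ p : Nat) : Int) - 1) % 256 = ((255 - (m ^^^ p) % 256 : Nat) : Int) := by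
      omega
    rw [h1, pvNatXorMod]
    rw [show (a % 256).toNat = 255 - m % 256 by omega,
        show (b % 256).toNat = p % 256 by omega]
    rw [Nat.xor_comm (m % 256), pvFlip (p % 256) (m % 256) (by omega) (by omega)]
    rw [Nat.xor_comm]
  · set ma := (-a - 1).toNat with hma
    set mb := (-b - 1).toNat with hmb
    calc ((ma ^^^ mb : Nat) : Int) % 256
        = (((ma ^^^ mb) % 256 : Nat) : Int) := by omega
      _ = (((ma % 256) ^^^ (mb % 256) : Nat) : Int) := by rw [pvNatXorMod]
      _ = (((255 - ma % 256) ^^^ (255 - mb % 256) : Nat) : Int) := by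
          rw [pvFlip2 (ma % 256) (mb % 256) (by omega) (by omega)]
      _ = (((a % 256).toNat ^^^ (b % 256).toNat : Nat) : Int) := by
          rw [show (a % 256).toNat = 255 - ma % 256 by omega,
              show (b % 256).toNat = 255 - mb % 256 by omega]

lemma pvBand255 (a : Int) : PySem.Int.band a 255 = a % 256 := by
  unfold PySem.Int.band
  split_ifs with ha hb hb
  · rw [show Int.toNat 255 = 255 from rfl, pvNatMask]; omega
  · omega
  · rw [show ((255:Int)).toNat = 255 from rfl, Nat.land_comm, pvNatMask]; omega
  · omega

set_option maxRecDepth 8192 in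
lemma pvNatAnd128' (m : Nat) (h : m < 256) : 128 - (m &&& 128) = (255 - m) &&& 128 := by
  revert h; revert m; decide

lemma pvBand128 (a : Int) : PySem.Int.band a 128 = (((a % 256).toNat &&& 128 : Nat) : Int) := by
  unfold PySem.Int.band
  split_ifs with ha hb hb
  · rw [show (a.toNat &&& (128:Int).toNat) = a.toNat &&& 128 from rfl, pvNatAnd128,
        show (a % 256).toNat = a.toNat % 256 by omega]
  · omega
  · set m := (-a - 1).toNat with hm
    rw [show ((128:Int)).toNat = 128 from rfl, Nat.land_comm, pvNatAnd128,
        pvNatAnd128' (m % 256) (by omega),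
        show (a % 256).toNat = 255 - m % 256 by omega]
  · omega

-- ----- proof helpers: a Nat mirror of the bit-serial step, and Bool-level bits -----

def pvSN (p : Nat) : Nat :=
  if p &&& 128 ≠ 0 then ((p <<< 1) ^^^ 7) &&& 255 else (p <<< 1) &&& 255

def pvStepB (c : Int) (b : Bool) : Int := pvStepA c (cond b 1 0)

def pvPackB (l : List Bool) : Int :=
  l.foldl (fun a b => PySem.Int.bor (a <<< (1 : Nat)) (cond b (1:Int) 0)) 0

def pvSit : Nat → Int → Int
  | 0, x => x
  | k + 1, x => pvSit k (pvStep0 x)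

lemma pvStepA_eq (c bit : Int) :
    pvStepA c bit = pvStep0 (PySem.Int.bxor c (bit <<< (7 : Nat))) := rfl

lemma pvTableEntry_eq (b : Int) : pvTableEntry b = pvSit 8 b := by
  have h8 : pvSit 8 b
      = pvStep0 (pvStep0 (pvStep0 (pvStep0 (pvStep0 (pvStep0 (pvStep0 (pvStep0 b))))))) := by
    show pvSit (0+1+1+1+1+1+1+1+1) b = _
    simp only [pvSit]
  unfold pvTableEntry
  rw [show List.range 8 = [0,1,2,3,4,5,6,7] by rfl]
  simp only [List.foldl_cons, List.foldl_nil]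
  rw [h8]

-- pvSN in arithmetic form (no masks)
lemma pvSN_eq (p : Nat) :
    pvSN p = if p.testBit 7 then (2 * p) % 256 ^^^ 7 else (2 * p) % 256 := by
  unfold pvSN
  have h1 : p &&& 128 = (p.testBit 7).toNat * 128 := by
    have := Nat.and_two_pow p 7
    simpa using this
  have h2 : p <<< 1 = 2 * p := by rw [Nat.shiftLeft_eq]; ring
  rw [h1, h2, pvNatMask, pvNatMask, pvNatXorMod]
  cases hp : p.testBit 7 <;> simp

lemma pvNatMulXor (a b : Nat) : 2 * (a ^^^ b) = 2 * a ^^^ 2 * b := by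
  have h : (a ^^^ b) <<< 1 = (a <<< 1) ^^^ (b <<< 1) := by
    apply Nat.eq_of_testBit_eq; intro i
    simp only [Nat.testBit_shiftLeft, Nat.testBit_xor]
    by_cases h1 : 1 ≤ i <;> simp [h1]
  simpa [Nat.shiftLeft_eq, Nat.mul_comm] using h

lemma pvSNlin (p q : Nat) : pvSN (p ^^^ q) = pvSN p ^^^ pvSN q := by
  rw [pvSN_eq, pvSN_eq, pvSN_eq, Nat.testBit_xor]
  have hx : (2 * (p ^^^ q)) % 256 = (2 * p) % 256 ^^^ (2 * q) % 256 := by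
    rw [pvNatMulXor, pvNatXorMod]
  cases hp : p.testBit 7 <;> cases hq : q.testBit 7 <;>
    simp [hx, Nat.xor_comm, Nat.xor_left_comm]

-- pvStep0 is the Nat mirror on the low byte
lemma pvSRep (z : Int) : pvStep0 z = ((pvSN ((z % 256).toNat) : Nat) : Int) := by
  have hsh : ((z <<< (1:Nat)) % 256).toNat = ((z % 256).toNat <<< 1) % 256 := by
    rw [Int.shiftLeft_eq, Nat.shiftLeft_eq]
    rw [show ((2:Int)^(1:Nat)) = 2 by norm_num, show ((2:Nat)^(1:Nat)) = 2 by norm_num]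
    omega
  unfold pvStep0 pvSN
  rw [pvBand128 z]
  by_cases h : ((z % 256).toNat &&& 128) = 0
  · rw [if_neg (by simp [h]), if_neg (by simp [h])]
    rw [pvBand255, pvNatMask, ← hsh]
    omega
  · rw [if_pos (by simpa using h), if_pos (by simpa using h)]
    rw [pvBand255, pvXorMod, hsh]
    rw [show ((7:Int) % 256).toNat = 7 from rfl, pvNatMask, pvNatXorMod]

lemma pvStep0_range (x : Int) : 0 ≤ pvStep0 x ∧ pvStep0 x < 256 := by
  rw [pvSRep]
  have h : pvSN ((x % 256).toNat) < 256 := by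
    unfold pvSN
    split_ifs <;> exact Nat.lt_succ_of_le Nat.and_le_right
  omega

-- linearity of the bit-serial step
lemma pvLin (x y : Int) :
    pvStep0 (PySem.Int.bxor x y) = PySem.Int.bxor (pvStep0 x) (pvStep0 y) := by
  rw [pvSRep x, pvSRep y, pvSRep (PySem.Int.bxor x y)]
  rw [show ((PySem.Int.bxor x y) % 256).toNat = (x % 256).toNat ^^^ (y % 256).toNat by
        rw [pvXorMod]; omega]
  rw [pvSNlin]
  simp [PySem.Int.bxor_natCast]

-- below the top bit the step is a plain doubling
lemma pvSmallS (v : Int) (h0 : 0 ≤ v) (h1 : v < 128) : pvStep0 v = v <<< (1:Nat) := by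
  rw [pvSRep]
  have hv : (v % 256).toNat = v.toNat := by omega
  have ht : v.toNat.testBit 7 = false := by
    apply Nat.testBit_eq_false_of_lt; omega
  rw [hv, pvSN_eq, ht, if_neg (by simp)]
  rw [Int.shiftLeft_eq]
  omega

lemma pvStepA_emod (c bit : Int) : pvStepA c bit = pvStepA c (bit % 2) := by
  rw [pvStepA_eq, pvStepA_eq, Int.shiftLeft_eq, Int.shiftLeft_eq,
      show ((2:Int)^(7:Nat)) = 128 by norm_num]
  rw [pvSRep, pvSRep, pvXorMod, pvXorMod]
  rw [show (bit % 2 * 128) % 256 = (bit * 128) % 256 by omega]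

lemma pvBxor_nonneg_lt (a b : Int) (ha0 : 0 ≤ a) (ha1 : a < 256) (hb0 : 0 ≤ b) (hb1 : b < 256) :
    0 ≤ PySem.Int.bxor a b ∧ PySem.Int.bxor a b < 256 := by
  rw [PySem.Int.bxor_of_nonneg ha0 hb0]
  have := pvXorLt a.toNat b.toNat (by omega) (by omega)
  omega

lemma pvXorAssoc (a b c : Int) (ha : 0 ≤ a) (hb : 0 ≤ b) (hc : 0 ≤ c) :
    PySem.Int.bxor (PySem.Int.bxor a b) c = PySem.Int.bxor a (PySem.Int.bxor b c) := by
  rw [PySem.Int.bxor_of_nonneg ha hb, PySem.Int.bxor_of_nonneg hb hc]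
  rw [PySem.Int.bxor_of_nonneg (by positivity) hc, PySem.Int.bxor_of_nonneg ha (by positivity)]
  simp [Nat.xor_assoc]

-- table lookup = 8 bit-serial steps
lemma pvTable_getD (n : Nat) (h : n < 256) : pvTable.getD n 0 = pvTableEntry (Int.ofNat n) := by
  unfold pvTable
  rw [List.getD_eq_getElem _ _ (by simpa using h)]
  simp

-- Nat: 2n ||| 1 = 2n + 1
lemma pvNatOrOne (n : Nat) : (2 * n) ||| 1 = 2 * n + 1 := by
  apply Nat.eq_of_testBit_eq; intro i
  cases i with
  | zero =>
      simp [Nat.testBit_zero]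
  | succ j =>
      rw [Nat.testBit_lor]
      have h1 : Nat.testBit 1 (j + 1) = false :=
        Nat.testBit_eq_false_of_lt (by have := Nat.one_lt_two_pow_iff (n := j + 1); omega)
      rw [h1, Bool.or_false, Nat.testBit_succ, Nat.testBit_succ]
      have : 2 * n / 2 = (2 * n + 1) / 2 := by omega
      rw [this]

lemma pvBorBit (a : Int) (ha : 0 ≤ a) (b : Bool) :
    PySem.Int.bor (a <<< (1:Nat)) (cond b 1 0) = 2 * a + cond b 1 0 := by
  cases b
  · simp [Int.shiftLeft_eq]; omega
  · simp only [cond]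
    rw [PySem.Int.bor_of_nonneg (by rw [Int.shiftLeft_eq]; omega) (by norm_num)]
    rw [show ((1:Int)).toNat = 1 from rfl,
        show (a <<< (1:Nat)).toNat = 2 * a.toNat by rw [Int.shiftLeft_eq]; omega,
        pvNatOrOne]
    omega

-- packing: closed arithmetic form and bounds
lemma pvPackAux (l : List Bool) : ∀ a : Int, 0 ≤ a →
    l.foldl (fun a b => PySem.Int.bor (a <<< (1 : Nat)) (cond b (1:Int) 0)) a
      = a * 2 ^ l.length + pvPackB l
    ∧ 0 ≤ pvPackB l ∧ pvPackB l < 2 ^ l.length := by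
  induction l with
  | nil => intro a ha; simp [pvPackB]
  | cons b t ih =>
      intro a ha
      have hstep : ∀ x : Int, 0 ≤ x →
          (b :: t).foldl (fun a b => PySem.Int.bor (a <<< (1 : Nat)) (cond b (1:Int) 0)) x
            = t.foldl (fun a b => PySem.Int.bor (a <<< (1 : Nat)) (cond b (1:Int) 0))
                (2 * x + cond b 1 0) := by
        intro x hx; simp [List.foldl, pvBorBit x hx b]
      have hb : (0:Int) ≤ cond b 1 0 ∧ (cond b (1:Int) 0) ≤ 1 := by cases b <;> simp
      have h1 := ih (2 * a + cond b 1 0) (by omega)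
      have h2 := ih (cond b 1 0) (by omega)
      have hpb : pvPackB (b :: t) = (cond b (1:Int) 0) * 2 ^ t.length + pvPackB t := by
        unfold pvPackB
        rw [hstep 0 le_rfl]
        simpa using h2.1
      refine ⟨?_, ?_, ?_⟩
      · rw [hstep a ha, h1.1, hpb]; simp [List.length_cons]; ring
      · rw [hpb]
        have h4 := mul_nonneg hb.1 (le_of_lt (pow_pos (show (0:Int) < 2 by norm_num) t.length))
        linarith [h1.2.1]
      · rw [hpb]
        have := h1.2.2
        have h3 : (2:Int) ^ (b :: t).length = 2 * 2 ^ t.length := by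
          simp [List.length_cons]; ring
        rw [h3]
        have := h2.2.1
        have := h2.2.2
        have : (cond b (1:Int) 0) * 2 ^ t.length ≤ 2 ^ t.length := by
          rcases hb with ⟨hb1, hb2⟩
          nlinarith [pow_pos (show (0:Int) < 2 by norm_num) t.length]
        omega

lemma pvPackB_bounds (l : List Bool) : 0 ≤ pvPackB l ∧ pvPackB l < 2 ^ l.length :=
  (pvPackAux l 0 le_rfl).2

lemma pvPackB_cons (b : Bool) (t : List Bool) :
    pvPackB (b :: t) = (cond b (1:Int) 0) * 2 ^ t.length + pvPackB t := by
  unfold pvPackB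
  have h2 := pvPackAux t (cond b 1 0) (by cases b <;> simp)
  simp only [List.foldl]
  rw [show PySem.Int.bor ((0:Int) <<< (1:Nat)) (cond b 1 0) = cond b 1 0 by
        rw [pvBorBit 0 le_rfl b]; ring]
  simpa using h2.1

-- xor of the top bit with a sub-128 value is addition
lemma pvXorTop (b : Bool) (z : Int) (h0 : 0 ≤ z) (h1 : z < 128) :
    PySem.Int.bxor ((cond b (1:Int) 0) <<< (7:Nat)) z = (cond b (1:Int) 0) * 128 + z := by
  cases b
  · simp only [cond]
    rw [show ((0:Int) <<< (7:Nat)) = 0 by rw [Int.shiftLeft_eq]; ring]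
    rw [PySem.Int.bxor_comm]
    simp
  · simp only [cond]
    rw [show ((1:Int) <<< (7:Nat)) = 128 by rw [Int.shiftLeft_eq]; norm_num]
    rw [PySem.Int.bxor_of_nonneg (by norm_num) h0]
    have hn : (128:Int).toNat ^^^ z.toNat = 128 + z.toNat := by
      have hz : z.toNat < 128 := by omega
      revert hz; generalize z.toNat = m; revert m; decide
    omega

-- the chunk lemma: k bits through A's step = k bit-serial steps on the packed value
lemma pvChunkGen (l : List Bool) : l.length ≤ 8 → ∀ y : Int, 0 ≤ y →
    l.foldl pvStepB y = pvSit l.length (PySem.Int.bxor y (pvPackB l <<< (8 - l.length))) := by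
  induction l with
  | nil =>
      intro _ y hy
      simp [pvPackB, pvSit, show ((0:Int) <<< (8:Nat)) = 0 by rw [Int.shiftLeft_eq]; ring]
  | cons b t ih =>
      intro hlen y hy
      have hk : t.length ≤ 7 := by simp [List.length_cons] at hlen; omega
      obtain ⟨hP0, hP1⟩ := pvPackB_bounds t
      have hstep0 : 0 ≤ pvStepB y b ∧ pvStepB y b < 256 := by
        unfold pvStepB; rw [pvStepA_eq]; exact pvStep0_range _
      have lhs1 : (b :: t).foldl pvStepB y = t.foldl pvStepB (pvStepB y b) := by
        simp [List.foldl]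
      rw [lhs1, ih (by omega) _ hstep0.1]
      -- z' = pvPackB t <<< (7 - t.length), with pvStep0 z' = pvPackB t <<< (8 - t.length)
      set k := t.length with hkdef
      have hz0 : 0 ≤ pvPackB t <<< (7 - k) := by
        rw [Int.shiftLeft_eq]; positivity
      have hz1 : pvPackB t <<< (7 - k) < 128 := by
        rw [Int.shiftLeft_eq]
        calc pvPackB t * 2 ^ (7 - k) < 2 ^ k * 2 ^ (7 - k) := by
              have : (0:Int) < 2 ^ (7 - k) := by positivity
              nlinarith
          _ = 2 ^ (k + (7 - k)) := by rw [pow_add]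
          _ ≤ 2 ^ 7 := by
              apply pow_le_pow_right₀ (by norm_num)
              omega
          _ = 128 := by norm_num
      have hz2 : pvStep0 (pvPackB t <<< (7 - k)) = pvPackB t <<< (8 - k) := by
        rw [pvSmallS _ hz0 hz1, Int.shiftLeft_eq, Int.shiftLeft_eq, Int.shiftLeft_eq]
        have h78 : 8 - k = (7 - k) + 1 := by omega
        rw [h78, pow_add]; ring
      have hBb : (0:Int) ≤ ((cond b 1 0 : Int) <<< (7:Nat)) := by
        cases b <;> decide
      have key : PySem.Int.bxor (pvStepB y b) (pvPackB t <<< (8 - k))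
          = pvStep0 (PySem.Int.bxor y (pvPackB (b :: t) <<< (8 - (k + 1)))) := by
        rw [← hz2, pvStepB, pvStepA_eq, ← pvLin]
        congr 1
        rw [pvXorAssoc _ _ _ hy hBb hz0]
        congr 1
        rw [pvXorTop b _ hz0 hz1, pvPackB_cons]
        rw [Int.shiftLeft_eq, Int.shiftLeft_eq, ← hkdef]
        rw [show ((8:Nat) - (k+1)) = 7 - k by omega,
            show ((128:Int)) = 2^(7:Nat) by norm_num,
            show ((2:Int)^(7:Nat)) = 2^k * 2^((7:Nat)-k) by rw [← pow_add]; congr 1; omega]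
        ring
      rw [key]
      simp only [List.length_cons, pvSit]
      rfl

lemma pvChunk8 (y : Int) (hy : 0 ≤ y) (b0 b1 b2 b3 b4 b5 b6 b7 : Bool) :
    [b0,b1,b2,b3,b4,b5,b6,b7].foldl pvStepB y
      = pvTableEntry (PySem.Int.bxor y (pvPackB [b0,b1,b2,b3,b4,b5,b6,b7])) := by
  have h := pvChunkGen [b0,b1,b2,b3,b4,b5,b6,b7] (by simp) y hy
  simpa [pvTableEntry_eq, show ((8:Nat) - 8) = 0 from rfl,
         show ∀ z : Int, z <<< (0:Nat) = z from fun z => by rw [Int.shiftLeft_eq]; ring] using h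

-- A's step, and Source B's bit extraction, in Bool form
lemma pvStepA_toB (c b : Int) : pvStepA c b = pvStepB c (decide (b % 2 = 1)) := by
  rw [pvStepA_emod]
  unfold pvStepB
  have h : b % 2 = 0 ∨ b % 2 = 1 := by omega
  rcases h with h | h <;> simp [h]

lemma pvBandOne (b : Int) : PySem.Int.band b 1 = cond (decide (b % 2 = 1)) 1 0 := by
  rw [PySem.Int.band_one, PySem.Int.mod_eq_emod_of_pos (by norm_num)]
  have h : b % 2 = 0 ∨ b % 2 = 1 := by omega
  rcases h with h | h <;> simp [h]

lemma pvPack_toB (b0 b1 b2 b3 b4 b5 b6 b7 : Int) :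
    pvPack [b0,b1,b2,b3,b4,b5,b6,b7]
      = pvPackB [decide (b0 % 2 = 1), decide (b1 % 2 = 1), decide (b2 % 2 = 1),
                 decide (b3 % 2 = 1), decide (b4 % 2 = 1), decide (b5 % 2 = 1),
                 decide (b6 % 2 = 1), decide (b7 % 2 = 1)] := by
  simp only [pvPack, pvPackB, List.foldl, pvBandOne]

lemma pvSit_range (k : Nat) (hk : 0 < k) (x : Int) : 0 ≤ pvSit k x ∧ pvSit k x < 256 := by
  induction k generalizing x with
  | zero => omega
  | succ n ih =>
      cases Nat.eq_zero_or_pos n with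
      | inl h => subst h; simpa [pvSit] using pvStep0_range x
      | inr h => simpa [pvSit] using ih h (pvStep0 x)

lemma pvTailStep_eq (c b : Int) : pvTailStep c b = pvStepA c b := by
  unfold pvTailStep
  rw [pvStepA_toB, pvBandOne]
  rfl

lemma pvTail_eq (l : List Int) : ∀ crc : Int, l.foldl pvTailStep crc = l.foldl pvStepA crc := by
  induction l with
  | nil => intro crc; rfl
  | cons b t ih => intro crc; simp only [List.foldl, pvTailStep_eq]; exact ih _

lemma pvMain : ∀ (crc : Int) (bits : List Int), 0 ≤ crc → crc < 256 →
    pvAltLoop crc bits = bits.foldl pvStepA crc := by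
  intro crc bits
  fun_induction pvAltLoop crc bits with
  | case1 crc b0 b1 b2 b3 b4 b5 b6 b7 rest ih =>
      intro h0 h1
      obtain ⟨hp0, hp1⟩ := pvPackB_bounds
        [decide (b0 % 2 = 1), decide (b1 % 2 = 1), decide (b2 % 2 = 1), decide (b3 % 2 = 1),
         decide (b4 % 2 = 1), decide (b5 % 2 = 1), decide (b6 % 2 = 1), decide (b7 % 2 = 1)]
      have hp1' : pvPackB [decide (b0 % 2 = 1), decide (b1 % 2 = 1), decide (b2 % 2 = 1),
          decide (b3 % 2 = 1), decide (b4 % 2 = 1), decide (b5 % 2 = 1), decide (b6 % 2 = 1),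
          decide (b7 % 2 = 1)] < 256 := by simpa using hp1
      obtain ⟨hx0, hx1⟩ := pvBxor_nonneg_lt crc _ h0 h1 hp0 hp1'
      have harg : pvTable.getD (PySem.Int.bxor crc
            (pvPackB [decide (b0 % 2 = 1), decide (b1 % 2 = 1), decide (b2 % 2 = 1),
                      decide (b3 % 2 = 1), decide (b4 % 2 = 1), decide (b5 % 2 = 1),
                      decide (b6 % 2 = 1), decide (b7 % 2 = 1)])).toNat 0
          = pvTableEntry (PySem.Int.bxor crc
              (pvPackB [decide (b0 % 2 = 1), decide (b1 % 2 = 1), decide (b2 % 2 = 1),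
                        decide (b3 % 2 = 1), decide (b4 % 2 = 1), decide (b5 % 2 = 1),
                        decide (b6 % 2 = 1), decide (b7 % 2 = 1)])) := by
        rw [pvTable_getD _ (by omega)]
        congr 1
        simp [Int.toNat_of_nonneg hx0]
      rw [pvPack_toB] at ih ⊢
      have hrange := pvSit_range 8 (by norm_num) (PySem.Int.bxor crc
          (pvPackB [decide (b0 % 2 = 1), decide (b1 % 2 = 1), decide (b2 % 2 = 1),
                    decide (b3 % 2 = 1), decide (b4 % 2 = 1), decide (b5 % 2 = 1),
                    decide (b6 % 2 = 1), decide (b7 % 2 = 1)]))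
      rw [← pvTableEntry_eq] at hrange
      rw [harg] at ih
      rw [harg, ih hrange.1 hrange.2]
      have hsplit : (b0 :: b1 :: b2 :: b3 :: b4 :: b5 :: b6 :: b7 :: rest)
          = [b0, b1, b2, b3, b4, b5, b6, b7] ++ rest := rfl
      rw [hsplit, List.foldl_append]
      congr 1
      rw [show ([b0, b1, b2, b3, b4, b5, b6, b7].foldl pvStepA crc)
            = [decide (b0 % 2 = 1), decide (b1 % 2 = 1), decide (b2 % 2 = 1),
               decide (b3 % 2 = 1), decide (b4 % 2 = 1), decide (b5 % 2 = 1),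
               decide (b6 % 2 = 1), decide (b7 % 2 = 1)].foldl pvStepB crc by
        simp only [List.foldl, pvStepA_toB]]
      rw [pvChunk8 crc h0]
  | case2 crc rest h =>
      intro _ _
      exact pvTail_eq rest crc

-- ===== VERDICT (by name: the statement is the Claim_ definition above) =====
theorem compute_crc8_spec : Claim_equal_compute_crc8 := by
  intro bits _
  unfold Spec_compute_crc8 compute_crc8 compute_crc8_alt
  exact (pvMain 0 bits (by norm_num) (by norm_num)).symm
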